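-- pv_equiv track=rewrite | github.com/mepavan7/python-practice | reversepattern/revalternate.py | reverse_alternate_k
-- ===== SOURCE A (Python) =====
-- def reverse_alternate_k(s, k):
--     #final_res = []
--     res = ""
--     for i in range(len(s), 0,-(2*k)):
--         '''right_part = s[i-k : i]
--         left_part = s[i-2*k : i-k]'''
--         left_start = max(0, i-2*k)
--         mid_start = max(0, i-k)
--         left_part = s[left_start:mid_start]
--         right_part = s[mid_start:i]
--         res =  (left_part + right_part[::-1]) + res
--         '''final_res.append(res)
--         final = "".join(final_res)
--         '''
--     return  res
-- ===== SOURCE B (Python) =====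
-- def reverse_alternate_k(s, k):
--     # split s into k-length runs aligned to the end, ordered end-to-start
--     runs = [s[max(0, i - k):i] for i in range(len(s), 0, -k)]
--     # run j (counting from the end) is reversed when j is even
--     out = [run[::-1] if j % 2 == 0 else run for j, run in enumerate(runs)]
--     return "".join(reversed(out))
-- ===== Notes on version B (the rewrite author's own statement) =====
-- stated objective: alternative
-- what changed: A walks the string once in a fused 2k-stride loop slicing a left and a reversed right part per step; B first splits the string into k-length runs aligned to the end, then in a second pass reverses exactly the runs whose index from the end is even and joins them.
import Mathlib
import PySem

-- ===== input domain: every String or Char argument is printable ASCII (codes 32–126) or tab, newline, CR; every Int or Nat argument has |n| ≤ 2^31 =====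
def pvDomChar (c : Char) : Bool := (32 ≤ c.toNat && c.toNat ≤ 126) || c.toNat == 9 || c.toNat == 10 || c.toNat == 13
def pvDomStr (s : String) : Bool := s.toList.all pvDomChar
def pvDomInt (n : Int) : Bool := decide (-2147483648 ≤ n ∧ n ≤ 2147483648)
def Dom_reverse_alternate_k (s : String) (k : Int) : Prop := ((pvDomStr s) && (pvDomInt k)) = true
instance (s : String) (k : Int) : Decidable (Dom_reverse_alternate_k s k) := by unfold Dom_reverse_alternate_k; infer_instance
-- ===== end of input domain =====

-- B re-decomposes A's fused 2k-stride walk into two passes: first split s into k-length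
-- runs aligned to the end of the string, then reverse every run whose index from the end
-- is even and join; objective: alternative decomposition (same cost).

-- ===== PORT A =====
-- literal port of A: one loop over range(len(s), 0, -(2*k)), prepending
-- left_part + right_part[::-1] to res each step (s[::-1] ported as .reverse,
-- exact by PySem.List.slice?_none_none_neg_one)
def reverse_alternate_k (s : String) (k : Int) : String :=
  let cs := s.toList
  let res := (PySem.List.pyRange (PySem.Str.len s) 0 (-(2*k))).foldl
    (fun res i =>
      let left_start := max 0 (i - 2*k)
      let mid_start := max 0 (i - k)
      let left_part := PySem.List.slice cs (some left_start) (some mid_start)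
      let right_part := PySem.List.slice cs (some mid_start) (some i)
      (left_part ++ right_part.reverse) ++ res)
    []
  String.ofList res

-- ===== PORT B =====
-- literal port of B: runs = [s[max(0,i-k):i] for i in range(len(s),0,-k)] (end-to-start),
-- reverse the runs with even index-from-end, join the list left-to-right
def reverse_alternate_k_alt (s : String) (k : Int) : String :=
  let cs := s.toList
  let runs := (PySem.List.pyRange (PySem.Str.len s) 0 (-k)).map
    (fun i => PySem.List.slice cs (some (max 0 (i - k))) (some i))
  let out := (PySem.List.enumerate runs 0).map
    (fun p => if PySem.Int.mod p.1 2 == 0 then p.2.reverse else p.2)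
  String.ofList (PySem.Chars.join [] out.reverse)

-- ===== PRECONDITION & SPEC =====
-- Pre_ excludes exactly k = 0, on which Python A raises ValueError (range step 0).
def Pre_reverse_alternate_k (s : String) (k : Int) : Prop := k ≠ 0
instance (s : String) (k : Int) : Decidable (Pre_reverse_alternate_k s k) := by unfold Pre_reverse_alternate_k; infer_instance
def pvWitness_reverse_alternate_k : String × Int := ("abcdefgh", 3)

def Spec_reverse_alternate_k (s : String) (k : Int) (out : String) : Prop := out = reverse_alternate_k_alt s k
instance (s : String) (k : Int) (out : String) : Decidable (Spec_reverse_alternate_k s k out) := by unfold Spec_reverse_alternate_k; infer_instance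

-- ===== CLAIM (what is proved, stated in full; the proofs are below) =====
def Claim_equal_reverse_alternate_k : Prop := ∀ (s : String) (k : Int), Dom_reverse_alternate_k s k → Pre_reverse_alternate_k s k → Spec_reverse_alternate_k s k (reverse_alternate_k s k)

-- ===== LEMMAS AND PROOFS =====

-- an empty descending range when the step is (mistakenly) positive: range(a, 0, t), t > 0, a ≥ 0
theorem pvRange_pos_to_zero_nil (a t : Int) (ht : 0 < t) (ha : 0 ≤ a) :
    PySem.List.pyRange a 0 t = [] := by
  rw [PySem.List.pyRange_of_pos a 0 ht, if_neg (by omega)]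
  simp

-- unfolding a pyRange with a general negative step (the book only has step = -1)
theorem pvRange_neg_cons (a b t : Int) (ht : t < 0) (h : b < a) :
    PySem.List.pyRange a b t = a :: PySem.List.pyRange (a + t) b t := by
  unfold PySem.List.pyRange
  simp only [if_neg (show ¬ t = 0 by omega), if_neg (show ¬ 0 < t by omega), if_pos h]
  have hcount : (a - b + -t - 1) / -t = (a - b - 1) / -t + 1 := by
    have : a - b + -t - 1 = (a - b - 1) + 1 * -t := by ring
    rw [this, Int.add_mul_ediv_right _ _ (by omega)]
  by_cases h2 : b < a + t
  · rw [if_pos h2]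
    have hc2 : (a + t - b + -t - 1) / -t = (a - b - 1) / -t := by ring_nf
    rw [hcount, hc2]
    have hpos : 0 ≤ (a - b - 1) / -t := Int.ediv_nonneg (by omega) (by omega)
    rw [show ((a - b - 1) / -t + 1).toNat = ((a - b - 1) / -t).toNat + 1 by omega]
    rw [List.range_succ_eq_map]
    simp [List.map_map, Function.comp_def, mul_add]
    intro x _
    ring
  · rw [if_neg h2]
    have hz : (a - b - 1) / -t = 0 := by
      apply Int.ediv_eq_zero_of_lt (by omega) (by omega)
    rw [hcount, hz]
    simp
theorem pvRange_neg_nil (a b t : Int) (ht : t < 0) (h : a ≤ b) :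
    PySem.List.pyRange a b t = [] := by
  unfold PySem.List.pyRange
  simp only [if_neg (show ¬ t = 0 by omega), if_neg (show ¬ 0 < t by omega), if_neg (show ¬ b < a by omega)]
  simp

-- A's loop prepends a block each step: the fold is the reverse-order concatenation of the blocks
theorem pvFoldl_prepend (g : Int → List Char) :
    ∀ (L : List Int) (acc : List Char),
      L.foldl (fun r i => g i ++ r) acc = ((L.map g).reverse).flatten ++ acc := by
  intro L
  induction L with
  | nil => simp
  | cons x xs ih => intro acc; simp [ih]

theorem pvJoin_nil_flatten (ps : List (List Char)) :
    PySem.Chars.join [] ps = ps.flatten := by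
  unfold PySem.Chars.join List.intercalate
  induction ps with
  | nil => simp
  | cons x xs ih => cases xs <;> simp_all [List.intersperse]

-- parity bookkeeping for the enumerate indices
theorem pvMod_succ_succ (sIdx : Int) (h : PySem.Int.mod sIdx 2 = 0) :
    PySem.Int.mod (sIdx + 1 + 1) 2 = 0 := by
  rw [PySem.Int.mod_eq_emod_of_pos (by omega)] at h ⊢; omega

-- the core correspondence: A's 2k-stride blocks, concatenated in reverse order,
-- equal B's parity-marked k-runs, concatenated in reverse order
theorem pvCore (cs : List Char) (k : Int) (hk : 0 < k) :
    ∀ (m : Nat) (i sIdx : Int), i ≤ (m : Int) → PySem.Int.mod sIdx 2 = 0 →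
      (((PySem.List.pyRange i 0 (-(2*k))).map (fun i =>
          PySem.List.slice cs (some (max 0 (i - 2*k))) (some (max 0 (i - k))) ++
          (PySem.List.slice cs (some (max 0 (i - k))) (some i)).reverse)).reverse).flatten
      = ((((PySem.List.enumerate ((PySem.List.pyRange i 0 (-k)).map
            (fun i => PySem.List.slice cs (some (max 0 (i - k))) (some i))) sIdx)).map
            (fun p => if PySem.Int.mod p.1 2 == 0 then p.2.reverse else p.2)).reverse).flatten := by
  intro m
  induction m using Nat.strong_induction_on with
  | _ m ih =>
    intro i sIdx him hs
    by_cases hi : i ≤ 0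
    · rw [pvRange_neg_nil i 0 _ (by omega) hi, pvRange_neg_nil i 0 _ (by omega) hi]
      simp
    · have hi : 0 < i := by omega
      by_cases hik : i ≤ k
      · -- one final (possibly short) run: both ranges are singletons
        rw [pvRange_neg_cons i 0 _ (by omega) hi, pvRange_neg_nil (i + -(2*k)) 0 _ (by omega) (by omega),
            pvRange_neg_cons i 0 (-k) (by omega) hi, pvRange_neg_nil (i + -k) 0 (-k) (by omega) (by omega)]
        simp only [List.map_cons, List.map_nil, PySem.List.enumerate_cons, List.reverse_cons,
          List.reverse_nil, List.nil_append, List.flatten_append, List.flatten_cons,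
          List.flatten_nil]
        have hd : 2 ∣ sIdx := by rwa [PySem.Int.mod_eq_zero_iff_dvd] at hs
        rw [show max 0 (i - 2*k) = 0 by omega, show max 0 (i - k) = 0 by omega]
        simp [hd, PySem.List.slice]
      · -- peel one 2k-block from A, two k-runs from B
        rw [pvRange_neg_cons i 0 _ (by omega) hi,
            pvRange_neg_cons i 0 (-k) (by omega) hi,
            pvRange_neg_cons (i + -k) 0 (-k) (by omega) (by omega)]
        have harith : i + -k + -k = i + -(2*k) := by ring
        rw [harith]
        simp only [List.map_cons, PySem.List.enumerate_cons, List.reverse_cons,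
          List.flatten_append, List.flatten_cons, List.flatten_nil]
        rw [ih (i + -(2*k)).toNat (by omega) (i + -(2*k)) (sIdx + 1 + 1) (by omega)
              (pvMod_succ_succ sIdx hs)]
        rw [show max 0 (i - k) = i - k by omega, show i + -k - k = i - 2*k by ring,
            show i + -k = i - k by ring]
        have hd : 2 ∣ sIdx := by rwa [PySem.Int.mod_eq_zero_iff_dvd] at hs
        have hd1 : ¬ 2 ∣ (sIdx + 1) := by omega
        simp [hd, hd1]

-- ===== VERDICT (by name: the statement is the Claim_ definition above) =====
theorem reverse_alternate_k_spec : Claim_equal_reverse_alternate_k := by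
  intro s k _ hk
  unfold Spec_reverse_alternate_k reverse_alternate_k reverse_alternate_k_alt
  simp only [PySem.Str.len_eq]
  rcases lt_or_gt_of_ne hk with hneg | hpos
  · rw [pvRange_pos_to_zero_nil _ _ (by omega) (by omega),
        pvRange_pos_to_zero_nil _ _ (by omega) (by omega)]
    simp [PySem.Chars.join_nil]
  · rw [pvFoldl_prepend, List.append_nil, pvJoin_nil_flatten]
    exact congrArg String.ofList
      (pvCore s.toList k hpos s.toList.length s.toList.length 0 (by omega) (by decide))
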